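-- pv_equiv track=rewrite | github.com/d3r3kk/advent_of_code_2018 | day_2/inventory_management.py | get_frequencies
-- ===== SOURCE A (Python) =====
-- import collections
--
-- def get_frequencies(input_list):
--     """
--     Return the number of times a character appears in a line.
--
--     Only if a specific character appears twice, or three times.
--     """
--     two_counts = 0
--     three_counts = 0
--
--     for line in input_list:
--         counter = collections.Counter(list(line))
--         two_occurances = {k: v for k, v in counter.items() if v == 2}
--         three_occurances = {k: v for k, v in counter.items() if v == 3}
--
--         if len(two_occurances) > 0:
--             two_counts += 1
--         if len(three_occurances) > 0:
--             three_counts += 1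
--
--     return two_counts, three_counts
-- ===== SOURCE B (Python) =====
-- def get_frequencies(input_list):
--     """
--     Return the number of times a character appears in a line.
--
--     Only if a specific character appears twice, or three times.
--     """
--     two_counts = 0
--     three_counts = 0
--
--     for line in input_list:
--         chars = sorted(line)
--         lengths = set()
--         i = 0
--         n = len(chars)
--         while i < n:
--             j = i
--             while j < n and chars[j] == chars[i]:
--                 j += 1
--             lengths.add(j - i)
--             i = j
--         if 2 in lengths:
--             two_counts += 1
--         if 3 in lengths:
--             three_counts += 1
--
--     return two_counts, three_counts
-- ===== Notes on version B (the rewrite author's own statement) =====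
-- stated objective: faster
-- what changed: Per line, the Counter hash-tally and the two dict comprehensions are replaced by sorting the characters and scanning consecutive runs with a two-pointer loop, collecting run lengths in a set that is then tested for 2 and 3.
import Mathlib
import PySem

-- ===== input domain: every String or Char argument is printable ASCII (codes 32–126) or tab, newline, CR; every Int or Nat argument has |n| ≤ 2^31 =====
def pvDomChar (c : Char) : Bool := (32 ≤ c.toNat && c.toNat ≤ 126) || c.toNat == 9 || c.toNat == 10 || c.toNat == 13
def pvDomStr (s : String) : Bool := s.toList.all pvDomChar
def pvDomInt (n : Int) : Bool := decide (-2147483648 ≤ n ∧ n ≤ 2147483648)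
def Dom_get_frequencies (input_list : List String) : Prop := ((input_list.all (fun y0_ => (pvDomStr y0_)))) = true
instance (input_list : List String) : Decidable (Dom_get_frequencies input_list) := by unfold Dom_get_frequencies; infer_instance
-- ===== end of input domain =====

-- B replaces A's per-line Counter tally and dict comprehensions by a sort-then-scan of
-- consecutive runs, collecting run lengths in a set (alternative decomposition, same cost class).

-- ===== PORT A =====
def get_frequencies (input_list : List String) : Int × Int :=
  input_list.foldl (fun (acc : Int × Int) line =>
    let counter := PySem.Dict.counter line.toList
    let two_occurances := PySem.Dict.ofList (counter.items.filter (fun kv => kv.2 == 2))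
    let three_occurances := PySem.Dict.ofList (counter.items.filter (fun kv => kv.2 == 3))
    let t2 := if two_occurances.size > 0 then acc.1 + 1 else acc.1
    let t3 := if three_occurances.size > 0 then acc.2 + 1 else acc.2
    (t2, t3)) (0, 0)

-- ===== PORT B =====
-- The inner while-loop of Source B ("advance j while chars[j] == chars[i], record j - i,
-- continue from j") is transcribed as this structural recursion: takeWhile is the j-scan,
-- dropWhile is "i = j".
def pvRunLengths : List Char → List Int
  | [] => []
  | x :: xs =>
      ((1 : Int) + (xs.takeWhile (· == x)).length) :: pvRunLengths (xs.dropWhile (· == x))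
termination_by l => l.length
decreasing_by
  simp only [List.length_cons]
  exact Nat.lt_succ_of_le (List.length_dropWhile_le _ _)

def get_frequencies_alt (input_list : List String) : Int × Int :=
  input_list.foldl (fun (acc : Int × Int) line =>
    let chars := PySem.List.sorted line.toList (fun c => c) false
    let lengths : PySem.Set Int := PySem.Set.ofList (pvRunLengths chars)
    let t2 := if PySem.Set.contains lengths 2 then acc.1 + 1 else acc.1
    let t3 := if PySem.Set.contains lengths 3 then acc.2 + 1 else acc.2
    (t2, t3)) (0, 0)

-- ===== PRECONDITION & SPEC =====
def Spec_get_frequencies (input_list : List String) (out : Int × Int) : Prop := out = get_frequencies_alt input_list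
instance (input_list : List String) (out : Int × Int) : Decidable (Spec_get_frequencies input_list out) := by unfold Spec_get_frequencies; infer_instance

-- ===== CLAIM (what is proved, stated in full; the proofs are below) =====
def Claim_equal_get_frequencies : Prop := ∀ (input_list : List String), Dom_get_frequencies input_list → Spec_get_frequencies input_list (get_frequencies input_list)

-- ===== LEMMAS AND PROOFS =====

-- In a nondecreasing list bounded below by x, x's occurrences are exactly the initial run of x's.
theorem pv_count_lb (x : Char) (xs : List Char)
    (hs : xs.Pairwise (· ≤ ·)) (hlb : ∀ y ∈ xs, x ≤ y) :
    xs.count x = (xs.takeWhile (· == x)).length := by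
  induction xs with
  | nil => simp
  | cons y ys ih =>
    rcases List.pairwise_cons.mp hs with ⟨hy, hys⟩
    by_cases hxy : y = x
    · subst hxy
      simp only [List.count_cons_self, List.takeWhile_cons, beq_self_eq_true, if_true,
        List.length_cons]
      rw [ih hys (fun z hz => hy z hz)]
    · have hx : x < y := lt_of_le_of_ne (hlb y (by simp)) (fun h => hxy h.symm)
      have h0 : ys.count x = 0 := by
        rw [List.count_eq_zero]
        intro hmem
        exact absurd (hy x hmem) (not_le.mpr hx)
      simp [hxy, h0]

-- After dropping the initial run of x's from a nondecreasing list bounded below by x,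
-- no x remains.
theorem pv_drop_ne (x c : Char) (xs : List Char)
    (hs : xs.Pairwise (· ≤ ·)) (hlb : ∀ y ∈ xs, x ≤ y)
    (hc : c ∈ xs.dropWhile (· == x)) : c ≠ x := by
  induction xs with
  | nil => simp at hc
  | cons y ys ih =>
    rcases List.pairwise_cons.mp hs with ⟨hy, hys⟩
    by_cases hxy : y = x
    · subst hxy
      simp only [List.dropWhile_cons, beq_self_eq_true, if_true] at hc
      exact ih hys (fun z hz => hy z hz) hc
    · have hx : x < y := lt_of_le_of_ne (hlb y (by simp)) (fun h => hxy h.symm)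
      simp only [List.dropWhile_cons, beq_iff_eq, hxy, if_false] at hc
      rw [List.mem_cons] at hc
      rcases hc with rfl | hc
      · exact hxy
      · have : y ≤ c := hy c hc
        exact fun h => absurd (h ▸ this) (not_le.mpr hx)

-- Run lengths of a sorted list are exactly the multiplicities of its members.
theorem pv_mem_runLengths (l : List Char) (h : l.Pairwise (· ≤ ·)) (k : Int) :
    k ∈ pvRunLengths l ↔ ∃ c ∈ l, (l.count c : Int) = k := by
  induction l using pvRunLengths.induct with
  | case1 => simp [pvRunLengths]
  | case2 x xs ih =>
    rcases List.pairwise_cons.mp h with ⟨hlb, hs⟩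
    have hd : (xs.dropWhile (· == x)).Pairwise (· ≤ ·) :=
      hs.sublist (List.dropWhile_sublist _)
    have ihd := ih hd
    have hcx : ((x :: xs).count x : Int) = 1 + (xs.takeWhile (· == x)).length := by
      rw [List.count_cons_self, pv_count_lb x xs hs hlb]
      push_cast; ring
    have hkeep : ∀ c ∈ xs.dropWhile (· == x), (x :: xs).count c = (xs.dropWhile (· == x)).count c := by
      intro c hc
      have hne : c ≠ x := pv_drop_ne x c xs hs hlb hc
      have hsplit : xs = xs.takeWhile (· == x) ++ xs.dropWhile (· == x) :=
        (List.takeWhile_append_dropWhile).symm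
      have ht0 : (xs.takeWhile (· == x)).count c = 0 := by
        rw [List.count_eq_zero]
        intro hmem
        have := List.mem_takeWhile_imp hmem
        exact hne (by simpa using this)
      have h1 : List.count c (x :: xs) = List.count c xs := by simp [Ne.symm hne]
      rw [h1]; conv_lhs => rw [hsplit]
      rw [List.count_append, ht0, Nat.zero_add]
    constructor
    · intro hk
      simp only [pvRunLengths, List.mem_cons] at hk
      rcases hk with rfl | hk
      · exact ⟨x, by simp, hcx⟩
      · rcases ihd.mp hk with ⟨c, hc, hcnt⟩
        refine ⟨c, List.mem_cons_of_mem _ ((List.dropWhile_sublist _).mem hc), ?_⟩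
        rw [hkeep c hc]; exact hcnt
    · rintro ⟨c, hc, hcnt⟩
      simp only [pvRunLengths, List.mem_cons]
      by_cases hcx' : c = x
      · subst hcx'
        left; rw [← hcnt, hcx]
      · right
        rw [List.mem_cons] at hc
        rcases hc with rfl | hc
        · exact absurd rfl hcx'
        · have hsplit : xs = xs.takeWhile (· == x) ++ xs.dropWhile (· == x) :=
            (List.takeWhile_append_dropWhile).symm
          have hcd : c ∈ xs.dropWhile (· == x) := by
            rw [hsplit, List.mem_append] at hc
            rcases hc with hc | hc
            · exact absurd (by simpa using List.mem_takeWhile_imp hc) hcx'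
            · exact hc
          exact ihd.mpr ⟨c, hcd, by rw [← hkeep c hcd]; exact hcnt⟩

-- Per line, B's test: "k is a run length of sorted(line)" ↔ "some char occurs k times".
theorem pv_line (cs : List Char) (k : Int) :
    (PySem.Set.contains (PySem.Set.ofList (pvRunLengths (PySem.List.sorted cs (fun c => c) false))) k = true)
      ↔ ∃ c ∈ cs, (cs.count c : Int) = k := by
  have hperm := PySem.List.sorted_perm cs (fun c => c) false
  have hpw : (PySem.List.sorted cs (fun c => c) false).Pairwise (· ≤ ·) :=
    PySem.List.sorted_pairwise cs (fun c => c)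
  rw [show (PySem.Set.contains (PySem.Set.ofList (pvRunLengths (PySem.List.sorted cs (fun c => c) false))) k = true)
        ↔ k ∈ PySem.Set.ofList (pvRunLengths (PySem.List.sorted cs (fun c => c) false)) from by
      simp [PySem.Set.contains]]
  rw [PySem.Set.mem_ofList, pv_mem_runLengths _ hpw k]
  constructor
  · rintro ⟨c, hc, hcnt⟩
    exact ⟨c, hperm.mem_iff.mp hc, by rw [← hperm.count_eq]; exact hcnt⟩
  · rintro ⟨c, hc, hcnt⟩
    exact ⟨c, hperm.mem_iff.mpr hc, by rw [hperm.count_eq]; exact hcnt⟩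

theorem pv_dict_size_le {κ ν : Type} [BEq κ] (l : List (κ × ν)) (d : PySem.Dict κ ν) :
    d.size ≤ (d.update l).size := by
  induction l generalizing d with
  | nil => simp [PySem.Dict.update]
  | cons p rest ih =>
    have h1 : d.size ≤ (d.insert p.1 p.2).size := by
      by_cases hc : d.contains p.1 = true <;>
        simp [PySem.Dict.insert, PySem.Dict.size, hc]
    calc d.size ≤ (d.insert p.1 p.2).size := h1
      _ ≤ ((d.insert p.1 p.2).update rest).size := ih _
      _ = (d.update (p :: rest)).size := by simp [PySem.Dict.update]

theorem pv_dict_nonempty {κ ν : Type} [BEq κ] (l : List (κ × ν)) :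
    (PySem.Dict.ofList l).size > 0 ↔ l ≠ [] := by
  cases l with
  | nil => simp [PySem.Dict.ofList, PySem.Dict.update, PySem.Dict.empty, PySem.Dict.size]
  | cons p rest =>
    simp only [ne_eq, List.cons_ne_nil, not_false_iff, iff_true]
    have h1 : (PySem.Dict.empty.insert p.1 p.2).size = 1 := by
      simp [PySem.Dict.insert, PySem.Dict.empty, PySem.Dict.contains, PySem.Dict.size]
    have := pv_dict_size_le rest (PySem.Dict.empty.insert p.1 p.2)
    have h2 : (PySem.Dict.ofList (p :: rest)).size = ((PySem.Dict.empty.insert p.1 p.2).update rest).size := by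
      simp [PySem.Dict.ofList, PySem.Dict.update]
    omega

-- Per line, A's test: "the filtered Counter dict is non-empty" ↔ "some char occurs k times".
theorem pv_A_cond (cs : List Char) (k : Int) :
    (PySem.Dict.ofList ((PySem.Dict.counter cs).items.filter (fun kv => kv.2 == k))).size > 0
      ↔ ∃ c ∈ cs, (cs.count c : Int) = k := by
  rw [pv_dict_nonempty, PySem.Dict.items_counter, List.filter_map]
  simp only [ne_eq, List.map_eq_nil_iff, List.filter_eq_nil_iff, Function.comp]
  push Not
  simp [PySem.Set.mem_ofList]

-- ===== VERDICT (by name: the statement is the Claim_ definition above) =====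
theorem get_frequencies_spec : Claim_equal_get_frequencies := by
  intro input_list _
  show get_frequencies input_list = get_frequencies_alt input_list
  unfold get_frequencies get_frequencies_alt
  apply PySem.List.foldl_congr_mem
  intro acc line _
  dsimp only
  have h2 := (pv_A_cond line.toList 2).trans (pv_line line.toList 2).symm
  have h3 := (pv_A_cond line.toList 3).trans (pv_line line.toList 3).symm
  rw [if_congr h2 rfl rfl, if_congr h3 rfl rfl]
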